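-- pv_equiv track=rewrite | github.com/simon-ging/typedparser | src/typedparser/objects.py | invert_dict_of_dict
-- ===== SOURCE A (Python) =====
-- from typing import Any, Callable, List, Type
--
-- def invert_dict_of_dict(dict_of_dict: dict[str, dict[str, Any]]) -> dict[str, dict[str, Any]]:
--     """
--     Invert a dictionary of dictionaries. Useful for creating dataframes.
--
--     Args:
--         dict_of_dict: dictionary of {key1: {field1: value1, field2: value2, ...}, ...}
--
--     Returns:
--         Dictionary of {field1: {key1: value1, key2: value2, ...}, ...}
--
--     """
--     regular_dict = {}
--     for key, value_dict in dict_of_dict.items():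
--         for field, value in value_dict.items():
--             if field not in regular_dict:
--                 regular_dict[field] = {}
--             regular_dict[field][key] = value
--     return regular_dict
-- ===== SOURCE B (Python) =====
-- def invert_dict_of_dict(dict_of_dict):
--     # Column-by-column rebuild: collect the distinct fields in first-encounter
--     # order, then build each field's column by one scan over the outer dict.
--     fields = []
--     for value_dict in dict_of_dict.values():
--         for field in value_dict:
--             if field not in fields:
--                 fields.append(field)
--     return {
--         field: {
--             key: value_dict[field]
--             for key, value_dict in dict_of_dict.items()
--             if field in value_dict
--         }
--         for field in fields
--     }
-- ===== Notes on version B (the rewrite author's own statement) =====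
-- stated objective: alternative
-- what changed: A streams once over all entries, mutating a growing dict-of-dicts in place; B first collects the distinct fields in first-encounter order and then builds the transposed dict column-by-column, one full scan of the outer dict per field, guarded by a membership test.
import Mathlib
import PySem

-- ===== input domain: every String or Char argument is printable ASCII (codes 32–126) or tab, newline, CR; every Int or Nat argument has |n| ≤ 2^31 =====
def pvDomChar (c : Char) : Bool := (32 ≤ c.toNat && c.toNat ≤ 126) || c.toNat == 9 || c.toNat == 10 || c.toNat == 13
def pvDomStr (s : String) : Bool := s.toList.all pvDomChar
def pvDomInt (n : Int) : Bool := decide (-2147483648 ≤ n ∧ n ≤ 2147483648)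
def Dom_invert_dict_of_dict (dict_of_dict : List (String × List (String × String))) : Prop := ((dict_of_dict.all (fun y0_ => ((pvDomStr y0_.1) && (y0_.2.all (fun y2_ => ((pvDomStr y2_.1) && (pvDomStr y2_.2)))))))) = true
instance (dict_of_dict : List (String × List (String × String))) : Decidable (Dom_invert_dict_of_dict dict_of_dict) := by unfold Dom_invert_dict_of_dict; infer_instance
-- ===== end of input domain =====

-- B rebuilds the transposed dict column-by-column (fields first, then one scan per field)
-- instead of A's single streaming pass; same return value, objective: alternative decomposition.
-- The dict-of-dicts parameter is read through PySem.Dict.ofList, so duplicate keys in the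
-- assoc-list encoding collapse exactly as in Python dict construction.

-- ===== PORT A =====
def invert_dict_of_dict (dict_of_dict : List (String × List (String × String))) : List (String × List (String × String)) :=
  let d : PySem.Dict String (PySem.Dict String String) :=
    PySem.Dict.ofList (dict_of_dict.map (fun kv => (kv.1, PySem.Dict.ofList kv.2)))
  -- regular_dict = {}; for key, value_dict in dict_of_dict.items(): for field, value in value_dict.items(): …
  let regular_dict : PySem.Dict String (PySem.Dict String String) :=
    d.items.foldl (fun reg kv =>
      kv.2.items.foldl (fun reg fv =>
        let reg' := if reg.contains fv.1 then reg else reg.insert fv.1 PySem.Dict.empty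
        reg'.modify fv.1 PySem.Dict.empty (fun inner => inner.insert kv.1 fv.2)) reg)
      PySem.Dict.empty
  regular_dict.items.map (fun p => (p.1, p.2.items))

-- ===== PORT B =====
def invert_dict_of_dict_alt (dict_of_dict : List (String × List (String × String))) : List (String × List (String × String)) :=
  let d : PySem.Dict String (PySem.Dict String String) :=
    PySem.Dict.ofList (dict_of_dict.map (fun kv => (kv.1, PySem.Dict.ofList kv.2)))
  -- fields = []; for value_dict in d.values(): for field in value_dict: if field not in fields: fields.append(field)
  let fields : List String :=
    d.items.foldl (fun acc kv =>
      kv.2.items.foldl (fun acc fv => if fv.1 ∈ acc then acc else acc ++ [fv.1]) acc) []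
  -- {field: {key: value_dict[field] for key, value_dict in d.items() if field in value_dict} for field in fields}
  -- (fields is duplicate-free and so are d's keys, so both dict comprehensions only append fresh keys)
  fields.map (fun f =>
    (f, d.items.filterMap (fun kv => (kv.2.get? f).map (fun v => (kv.1, v)))))

-- ===== PRECONDITION & SPEC =====
def Spec_invert_dict_of_dict (dict_of_dict : List (String × List (String × String))) (out : List (String × List (String × String))) : Prop := out = invert_dict_of_dict_alt dict_of_dict
instance (dict_of_dict : List (String × List (String × String))) (out : List (String × List (String × String))) : Decidable (Spec_invert_dict_of_dict dict_of_dict out) := by unfold Spec_invert_dict_of_dict; infer_instance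

-- ===== CLAIM (what is proved, stated in full; the proofs are below) =====
def Claim_equal_invert_dict_of_dict : Prop := ∀ (dict_of_dict : List (String × List (String × String))), Dom_invert_dict_of_dict dict_of_dict → Spec_invert_dict_of_dict dict_of_dict (invert_dict_of_dict dict_of_dict)

-- ===== LEMMAS AND PROOFS =====

-- Proof-side abbreviations for the two loop bodies and B's two phases.
def pvStepA (key : String) (reg : PySem.Dict String (PySem.Dict String String)) (fv : String × String) : PySem.Dict String (PySem.Dict String String) :=
  let reg' := if reg.contains fv.1 then reg else reg.insert fv.1 PySem.Dict.empty
  reg'.modify fv.1 PySem.Dict.empty (fun inner => inner.insert key fv.2)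

def pvFieldsL (es : List (String × PySem.Dict String String)) : List String :=
  es.foldl (fun acc kv =>
    kv.2.items.foldl (fun acc fv => if fv.1 ∈ acc then acc else acc ++ [fv.1]) acc) []

def pvColL (es : List (String × PySem.Dict String String)) (f : String) : List (String × String) :=
  es.filterMap (fun kv => (kv.2.get? f).map (fun v => (kv.1, v)))

def pvColAdd (ws : List (String × String)) (k f : String) : List (String × String) :=
  ((ws.find? (fun fv => fv.1 == f)).map (fun fv => [(k, fv.2)])).getD []

lemma pv_find_self {f : String} : ∀ {F : List String}, f ∈ F →
    F.find? (fun g => g == f) = some f := by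
  intro F hF
  induction F with
  | nil => cases hF
  | cons g F ih =>
    by_cases hg : g = f
    · subst hg; simp
    · have : f ∈ F := by
        rcases List.mem_cons.mp hF with h | h
        · exact absurd h.symm hg
        · exact h
      simp [hg, ih this]

lemma pv_contains_mk {κ ν : Type} [BEq κ] [LawfulBEq κ] (L : List (κ × ν)) (k : κ) :
    (PySem.Dict.mk L).contains k = (k ∈ L.map Prod.fst : Bool) := by
  induction L with
  | nil => rfl
  | cons p rest ih =>
    have h1 : (PySem.Dict.mk (p :: rest)).contains k = ((p.1 == k) || (PySem.Dict.mk rest).contains k) := rfl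
    rw [h1, ih, List.map_cons, Bool.eq_iff_iff]
    simp only [Bool.or_eq_true, beq_iff_eq, decide_eq_true_eq, List.mem_cons]
    constructor
    · rintro (h | h)
      · exact Or.inl h.symm
      · exact Or.inr h
    · rintro (h | h)
      · exact Or.inl h.symm
      · exact Or.inr h

lemma pv_insert_fresh {κ ν : Type} [BEq κ] [LawfulBEq κ] (L : List (κ × ν)) (k : κ) (v : ν)
    (h : k ∉ L.map Prod.fst) :
    (PySem.Dict.mk L).insert k v = PySem.Dict.mk (L ++ [(k, v)]) := by
  apply PySem.Dict.ext
  rw [PySem.Dict.items_insert_of_not_contains]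
  rw [pv_contains_mk]; simpa using h

-- the inner Python loop (over one value_dict, outer key `k`) extends every column
lemma pv_inner (k : String) :
    ∀ (ws : List (String × String)) (F : List String) (C : String → List (String × String)),
    F.Nodup →
    (ws.map Prod.fst).Nodup →
    (∀ g ∈ ws.map Prod.fst, k ∉ (C g).map Prod.fst) →
    (∀ g, g ∉ F → C g = []) →
    ws.foldl (pvStepA k) (PySem.Dict.mk (F.map (fun f => (f, PySem.Dict.mk (C f))))) =
      PySem.Dict.mk ((ws.foldl (fun acc fv => if fv.1 ∈ acc then acc else acc ++ [fv.1]) F).map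
        (fun f => (f, PySem.Dict.mk (C f ++ pvColAdd ws k f)))) := by
  intro ws
  induction ws with
  | nil =>
    intro F C _ _ _ _
    simp [pvColAdd]
  | cons fv rest ih =>
    intro F C hF hws hk hempty
    obtain ⟨f, v⟩ := fv
    have hws' : (f, v).1 ∉ rest.map Prod.fst ∧ (rest.map Prod.fst).Nodup := by
      rw [List.map_cons] at hws
      exact List.nodup_cons.mp hws
    have hfrest : f ∉ rest.map Prod.fst := hws'.1
    have hrest : (rest.map Prod.fst).Nodup := hws'.2
    have hkCf : k ∉ (C f).map Prod.fst := hk f (by simp)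
    by_cases hf : f ∈ F
    · -- field already present: the f-entry's inner dict gets (k, v) appended
      have hstep : pvStepA k (PySem.Dict.mk (F.map (fun g => (g, PySem.Dict.mk (C g))))) (f, v) =
          PySem.Dict.mk (F.map (fun g =>
            (g, PySem.Dict.mk (if g = f then C f ++ [(k, v)] else C g)))) := by
        unfold pvStepA
        have hcont : (PySem.Dict.mk (F.map (fun g => (g, PySem.Dict.mk (C g))))).contains f = true := by
          rw [pv_contains_mk]; simpa using hf
        simp only [hcont, if_true]
        have hget : (PySem.Dict.mk (F.map (fun g => (g, PySem.Dict.mk (C g))))).getD f PySem.Dict.empty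
            = PySem.Dict.mk (C f) := by
          simp only [PySem.Dict.getD, PySem.Dict.get?, List.find?_map]
          have : (fun p => p.1 == f) ∘ (fun g => (g, PySem.Dict.mk (C g))) = fun g => g == f := by
            funext g; rfl
          rw [this, pv_find_self hf]
          simp
        apply PySem.Dict.ext
        rw [PySem.Dict.modify, PySem.Dict.items_insert_of_contains _ _ hcont, hget]
        rw [PySem.Dict.items, List.map_map]
        apply List.map_congr_left
        intro g _
        by_cases hg : g = f
        · subst hg
          simp [pv_insert_fresh _ _ _ hkCf]
        · simp [hg]
      rw [List.foldl_cons, hstep,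
        ih F (fun g => if g = f then C f ++ [(k, v)] else C g) hF hrest
          (by
            intro g hg
            have hgf : g ≠ f := fun h => hfrest (h ▸ hg)
            simpa [hgf] using hk g (by simp [hg]))
          (by
            intro g hg
            have hgf : g ≠ f := fun h => hg (h ▸ hf)
            simpa [hgf] using hempty g hg)]
      simp only [List.foldl_cons, hf, if_true]
      congr 1
      apply List.map_congr_left
      intro g _
      by_cases hg : g = f
      · subst hg
        have hnone : rest.find? (fun fv => fv.1 == g) = none := by
          rw [List.find?_eq_none]
          intro x hx hbe
          exact hfrest (by
            have hx1 : x.1 = g := by simpa using hbe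
            exact hx1 ▸ List.mem_map_of_mem hx)
        simp [pvColAdd, hnone]
      · have hne : (f == g) = false := beq_eq_false_iff_ne.mpr (fun h => hg h.symm)
        simp [pvColAdd, hg, hne]
    · -- new field: appended with a fresh singleton column
      have hstep : pvStepA k (PySem.Dict.mk (F.map (fun g => (g, PySem.Dict.mk (C g))))) (f, v) =
          PySem.Dict.mk ((F ++ [f]).map (fun g =>
            (g, PySem.Dict.mk (if g = f then [(k, v)] else C g)))) := by
        unfold pvStepA
        have hcont : (PySem.Dict.mk (F.map (fun g => (g, PySem.Dict.mk (C g))))).contains f = false := by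
          rw [pv_contains_mk]; simpa using hf
        simp only [hcont, Bool.false_eq_true, if_false]
        have hins : (PySem.Dict.mk (F.map (fun g => (g, PySem.Dict.mk (C g))))).insert f PySem.Dict.empty
            = PySem.Dict.mk (F.map (fun g => (g, PySem.Dict.mk (C g))) ++ [(f, PySem.Dict.empty)]) := by
          apply PySem.Dict.ext
          rw [PySem.Dict.items_insert_of_not_contains _ _ hcont]
        rw [hins]
        have hcont2 : (PySem.Dict.mk (F.map (fun g => (g, PySem.Dict.mk (C g))) ++ [(f, PySem.Dict.empty)])).contains f = true := by
          rw [pv_contains_mk]; simp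
        have hget : (PySem.Dict.mk (F.map (fun g => (g, PySem.Dict.mk (C g))) ++ [(f, PySem.Dict.empty)])).getD f PySem.Dict.empty
            = PySem.Dict.empty := by
          simp only [PySem.Dict.getD, PySem.Dict.get?, List.find?_append, List.find?_map]
          have h1 : F.find? ((fun p => p.1 == f) ∘ (fun g => (g, PySem.Dict.mk (C g)))) = none := by
            rw [List.find?_eq_none]
            intro g hg hbe
            have hgf : g = f := by simpa using hbe
            exact hf (hgf ▸ hg)
          have h1' : F.find? (fun g => g == f) = none := by
            have : (fun p => p.1 == f) ∘ (fun g => (g, PySem.Dict.mk (C g))) = fun g => g == f := by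
              funext g; rfl
            rwa [this] at h1
          have : (fun p => p.1 == f) ∘ (fun g => (g, PySem.Dict.mk (C g))) = fun g => g == f := by
            funext g; rfl
          rw [this, h1']
          simp
        apply PySem.Dict.ext
        rw [PySem.Dict.modify, PySem.Dict.items_insert_of_contains _ _ hcont2, hget]
        rw [PySem.Dict.items, List.map_append, List.map_map]
        rw [List.map_append]
        congr 1
        · apply List.map_congr_left
          intro g hg
          have hgf : g ≠ f := fun h => hf (h ▸ hg)
          simp [hgf]
        · have : PySem.Dict.empty.insert k v = (PySem.Dict.mk [(k, v)] : PySem.Dict String String) := by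
            apply PySem.Dict.ext
            rw [PySem.Dict.items_insert_of_not_contains _ _ (by simp [PySem.Dict.contains, PySem.Dict.empty])]
            rfl
          simp [this]
      rw [List.foldl_cons, hstep,
        ih (F ++ [f]) (fun g => if g = f then [(k, v)] else C g)
          (by
            rw [List.nodup_append]
            refine ⟨hF, List.nodup_singleton f, ?_⟩
            intro a ha b hb
            simp only [List.mem_singleton] at hb
            subst hb
            exact fun h => hf (h ▸ ha))
          hrest
          (by
            intro g hg
            have hgf : g ≠ f := fun h => hfrest (h ▸ hg)
            simpa [hgf] using hk g (by simp [hg]))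
          (by
            intro g hg
            have hgf : g ≠ f := fun h => hg (by simp [h])
            have hgF : g ∉ F := fun h => hg (by simp [h])
            simpa [hgf] using hempty g hgF)]
      simp only [List.foldl_cons, hf, if_false]
      congr 1
      apply List.map_congr_left
      intro g _
      by_cases hg : g = f
      · subst hg
        have hnone : rest.find? (fun fv => fv.1 == g) = none := by
          rw [List.find?_eq_none]
          intro x hx hbe
          exact hfrest (by
            have hx1 : x.1 = g := by simpa using hbe
            exact hx1 ▸ List.mem_map_of_mem hx)
        simp [pvColAdd, hnone, hempty g hf]
      · have hne : (f == g) = false := beq_eq_false_iff_ne.mpr (fun h => hg h.symm)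
        simp [pvColAdd, hg, hne]

-- pvFieldsL facts
lemma pv_dedup_nodup : ∀ (xs : List (String × String)) (acc : List String), acc.Nodup →
    (xs.foldl (fun acc fv => if fv.1 ∈ acc then acc else acc ++ [fv.1]) acc).Nodup := by
  intro xs
  induction xs with
  | nil => intro acc h; exact h
  | cons x rest ih =>
    intro acc h
    rw [List.foldl_cons]
    by_cases hx : x.1 ∈ acc
    · simpa [hx] using ih acc h
    · simp only [hx, if_false]
      refine ih _ ?_
      rw [List.nodup_append]
      refine ⟨h, List.nodup_singleton _, ?_⟩
      intro a ha b hb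
      simp only [List.mem_singleton] at hb
      subst hb
      exact fun h' => hx (h' ▸ ha)

lemma pv_dedup_mem : ∀ (xs : List (String × String)) (acc : List String) (y : String),
    y ∈ xs.foldl (fun acc fv => if fv.1 ∈ acc then acc else acc ++ [fv.1]) acc ↔
      y ∈ acc ∨ y ∈ xs.map Prod.fst := by
  intro xs
  induction xs with
  | nil => intro acc y; simp
  | cons x rest ih =>
    intro acc y
    rw [List.foldl_cons]
    by_cases hx : x.1 ∈ acc
    · rw [if_pos hx, ih, List.map_cons]
      constructor
      · rintro (h | h)
        · exact Or.inl h
        · exact Or.inr (List.mem_cons_of_mem _ h)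
      · rintro (h | h)
        · exact Or.inl h
        · rcases List.mem_cons.mp h with rfl | h'
          · exact Or.inl hx
          · exact Or.inr h'
    · rw [if_neg hx, ih, List.map_cons]
      constructor
      · rintro (h | h)
        · rcases List.mem_append.mp h with h' | h'
          · exact Or.inl h'
          · exact Or.inr (List.mem_cons.mpr (Or.inl (List.mem_singleton.mp h')))
        · exact Or.inr (List.mem_cons_of_mem _ h)
      · rintro (h | h)
        · exact Or.inl (List.mem_append.mpr (Or.inl h))
        · rcases List.mem_cons.mp h with rfl | h'
          · exact Or.inl (List.mem_append.mpr (Or.inr (List.mem_singleton.mpr rfl)))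
          · exact Or.inr h'

lemma pv_fields_gen_nodup : ∀ (es : List (String × PySem.Dict String String)) (acc : List String),
    acc.Nodup →
    (es.foldl (fun acc kv =>
      kv.2.items.foldl (fun acc fv => if fv.1 ∈ acc then acc else acc ++ [fv.1]) acc) acc).Nodup := by
  intro es
  induction es with
  | nil => intro acc h; exact h
  | cons e rest ih => intro acc h; exact ih _ (pv_dedup_nodup _ _ h)

lemma pv_fields_gen_mem : ∀ (es : List (String × PySem.Dict String String)) (acc : List String) (y : String),
    y ∈ es.foldl (fun acc kv =>
      kv.2.items.foldl (fun acc fv => if fv.1 ∈ acc then acc else acc ++ [fv.1]) acc) acc ↔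
      y ∈ acc ∨ ∃ kv ∈ es, y ∈ kv.2.items.map Prod.fst := by
  intro es
  induction es with
  | nil => intro acc y; simp
  | cons e rest ih =>
    intro acc y
    rw [List.foldl_cons, ih, pv_dedup_mem]
    constructor
    · rintro ((h | h) | h)
      · exact Or.inl h
      · exact Or.inr ⟨e, by simp, h⟩
      · rcases h with ⟨kv, hkv, hfv⟩
        exact Or.inr ⟨kv, List.mem_cons_of_mem _ hkv, hfv⟩
    · rintro (h | ⟨kv, hkv, hfv⟩)
      · exact Or.inl (Or.inl h)
      · rcases List.mem_cons.mp hkv with rfl | h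
        · exact Or.inl (Or.inr hfv)
        · exact Or.inr ⟨kv, h, hfv⟩

lemma pv_col_empty (es : List (String × PySem.Dict String String)) (g : String)
    (h : g ∉ pvFieldsL es) : pvColL es g = [] := by
  unfold pvColL
  rw [List.filterMap_eq_nil_iff]
  intro kv hkv
  have : kv.2.get? g = none := by
    rw [PySem.Dict.get?, Option.map_eq_none_iff, List.find?_eq_none]
    intro fv hfv hbe
    have hfg : fv.1 = g := by simpa using hbe
    exact h ((pv_fields_gen_mem es [] g).mpr
      (Or.inr ⟨kv, hkv, hfg ▸ List.mem_map_of_mem hfv⟩))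
  simp [this]

lemma pv_col_keys (es : List (String × PySem.Dict String String)) (g y : String)
    (h : y ∈ (pvColL es g).map Prod.fst) : y ∈ es.map Prod.fst := by
  unfold pvColL at h
  rcases List.mem_map.mp h with ⟨p, hp, rfl⟩
  rcases List.mem_filterMap.mp hp with ⟨kv, hkv, hsome⟩
  rcases Option.map_eq_some_iff.mp hsome with ⟨v, _, heq⟩
  have : p.1 = kv.1 := by rw [← heq]
  exact this ▸ List.mem_map_of_mem hkv

-- the outer loop: A's regular_dict is exactly fields ↦ columns
lemma pv_outer : ∀ (es : List (String × PySem.Dict String String)),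
    (es.map Prod.fst).Nodup →
    (∀ kv ∈ es, kv.2.keys.Nodup) →
    es.foldl (fun reg kv => kv.2.items.foldl (pvStepA kv.1) reg) PySem.Dict.empty =
      PySem.Dict.mk ((pvFieldsL es).map (fun f => (f, PySem.Dict.mk (pvColL es f)))) := by
  intro es
  induction es using List.reverseRecOn with
  | nil => intro _ _; rfl
  | append_singleton l kv ih =>
    intro hnd hinner
    obtain ⟨k, vd⟩ := kv
    have hndl : (l.map Prod.fst).Nodup := by
      rw [List.map_append] at hnd
      exact (List.nodup_append.mp hnd).1
    have hkfresh : k ∉ l.map Prod.fst := by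
      rw [List.map_append] at hnd
      have hdisj := (List.nodup_append.mp hnd).2.2
      intro hmem
      have hk2 : k ∈ List.map Prod.fst [(k, vd)] := by simp
      exact hdisj k hmem k hk2 rfl
    have hvd : (vd.items.map Prod.fst).Nodup := hinner (k, vd) (by simp)
    rw [List.foldl_append, ih hndl (fun kv h => hinner kv (by simp [h])), List.foldl_cons,
      List.foldl_nil]
    have := pv_inner k vd.items (pvFieldsL l) (pvColL l)
      (pv_fields_gen_nodup l [] List.nodup_nil)
      hvd
      (fun g _ hmem => hkfresh (pv_col_keys l g k hmem))
      (fun g hg => pv_col_empty l g hg)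
    rw [this]
    congr 1
    have hfields : pvFieldsL (l ++ [(k, vd)]) =
        vd.items.foldl (fun acc fv => if fv.1 ∈ acc then acc else acc ++ [fv.1]) (pvFieldsL l) := by
      unfold pvFieldsL
      rw [List.foldl_append, List.foldl_cons, List.foldl_nil]
    rw [hfields]
    apply List.map_congr_left
    intro f _
    have hcol : pvColL (l ++ [(k, vd)]) f = pvColL l f ++ pvColAdd vd.items k f := by
      unfold pvColL pvColAdd
      rw [List.filterMap_append]
      congr 1
      rw [List.filterMap_cons, List.filterMap_nil]
      rw [PySem.Dict.get?]
      cases h : vd.items.find? (fun p => p.1 == f) with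
      | none => rfl
      | some p => rfl
    rw [hcol]

lemma pv_mem_items_foldl_insert {κ ν : Type} [BEq κ] [LawfulBEq κ] :
    ∀ (l : List (κ × ν)) (d : PySem.Dict κ ν) (p : κ × ν),
    p ∈ (l.foldl (fun d q => d.insert q.1 q.2) d).items → p ∈ d.items ∨ p ∈ l := by
  intro l
  induction l with
  | nil => intro d p h; exact Or.inl h
  | cons q rest ih =>
    intro d p h
    rw [List.foldl_cons] at h
    rcases ih _ p h with h' | h'
    · rcases (PySem.Dict.mem_items_insert _ _ _ _).mp h' with h'' | h''
      · exact Or.inr (by simp [h''])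
      · exact Or.inl h''.1
    · exact Or.inr (by simp [h'])

lemma pv_mem_items_ofList {κ ν : Type} [BEq κ] [LawfulBEq κ] (ps : List (κ × ν)) (p : κ × ν)
    (h : p ∈ (PySem.Dict.ofList ps).items) : p ∈ ps := by
  rcases pv_mem_items_foldl_insert ps PySem.Dict.empty p h with h' | h'
  · cases h'
  · exact h'

-- ===== VERDICT (by name: the statement is the Claim_ definition above) =====
theorem invert_dict_of_dict_spec : Claim_equal_invert_dict_of_dict := by
  intro l _
  unfold Spec_invert_dict_of_dict invert_dict_of_dict invert_dict_of_dict_alt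
  set d : PySem.Dict String (PySem.Dict String String) :=
    PySem.Dict.ofList (l.map (fun kv => (kv.1, PySem.Dict.ofList kv.2))) with hd
  have hnd : (d.items.map Prod.fst).Nodup := PySem.Dict.nodup_keys_ofList _
  have hinner : ∀ kv ∈ d.items, kv.2.keys.Nodup := by
    intro kv hkv
    have := pv_mem_items_ofList _ kv hkv
    rcases List.mem_map.mp this with ⟨q, _, hq⟩
    rw [← hq]
    exact PySem.Dict.nodup_keys_ofList _
  have houter := pv_outer d.items hnd hinner
  have hstep : (fun (reg : PySem.Dict String (PySem.Dict String String)) (kv : String × PySem.Dict String String) =>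
      kv.2.items.foldl (fun reg fv =>
        let reg' := if reg.contains fv.1 then reg else reg.insert fv.1 PySem.Dict.empty
        reg'.modify fv.1 PySem.Dict.empty (fun inner => inner.insert kv.1 fv.2)) reg) =
      (fun reg kv => kv.2.items.foldl (pvStepA kv.1) reg) := rfl
  simp only [hstep, houter]
  rw [PySem.Dict.items, List.map_map]
  rfl
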